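-- pv_equiv track=rewrite | github.com/breadwithmeth/medqc2 | app/utils_json.py | is_likely_truncated_json
-- ===== SOURCE A (Python) =====
-- def is_likely_truncated_json(txt: str) -> bool:
--     """
--     Грубая эвристика: начинаем с '{', но суммарно скобки не сошлись.
--     Игнорируем символы внутри строк с экранированием.
--     """
--     s = (txt or "").strip()
--     if not s.startswith("{"):
--         return False
--     depth = 0
--     in_str = False
--     esc = False
--     for ch in s:
--         if in_str:
--             if esc:
--                 esc = False
--             elif ch == "\\":
--                 esc = True
--             elif ch == "\"":
--                 in_str = False
--         else:
--             if ch == "\"":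
--                 in_str = True
--             elif ch == "{":
--                 depth += 1
--             elif ch == "}":
--                 depth -= 1
--                 if depth == 0:
--                     # нашли закрывающую скобку всего объекта — не обрезан
--                     return False
--     # дошли до конца без depth==0 -> похоже, оборванный
--     return True
-- ===== SOURCE B (Python) =====
-- def is_likely_truncated_json(txt: str) -> bool:
--     s = (txt or "").strip()
--     if not s.startswith("{"):
--         return False
--     # Pass 1: keep only structural braces occurring outside string literals.
--     braces = []
--     in_str = False
--     esc = False
--     for ch in s:
--         if in_str:
--             if esc:
--                 esc = False
--             elif ch == "\\":
--                 esc = True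
--             elif ch == "\"":
--                 in_str = False
--         else:
--             if ch == "\"":
--                 in_str = True
--             elif ch == "{" or ch == "}":
--                 braces.append(ch)
--     # Pass 2: balance the filtered braces; first top-level close => not truncated.
--     depth = 0
--     for ch in braces:
--         if ch == "{":
--             depth += 1
--         else:
--             depth -= 1
--             if depth == 0:
--                 return False
--     return True
-- ===== Notes on version B (the rewrite author's own statement) =====
-- stated objective: alternative
-- what changed: Splits A's single interleaved scan into two sequential passes: a string-literal state machine that filters out the structural braces, then a separate depth-balancing loop over just those braces with the early return at the first top-level close.
import Mathlib
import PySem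

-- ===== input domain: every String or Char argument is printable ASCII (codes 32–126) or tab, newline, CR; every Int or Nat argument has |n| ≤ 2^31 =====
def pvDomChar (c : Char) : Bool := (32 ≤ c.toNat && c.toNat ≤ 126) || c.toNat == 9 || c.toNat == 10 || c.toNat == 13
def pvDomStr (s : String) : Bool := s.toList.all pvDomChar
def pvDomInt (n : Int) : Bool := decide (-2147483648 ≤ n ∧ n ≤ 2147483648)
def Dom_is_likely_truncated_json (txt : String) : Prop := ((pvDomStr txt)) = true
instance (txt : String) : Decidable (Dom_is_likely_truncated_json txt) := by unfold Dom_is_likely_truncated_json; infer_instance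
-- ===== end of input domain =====

-- B replaces A's single interleaved scan by two sequential passes (filter structural braces, then balance them); same results, no speed claim.

-- ===== PORT A =====
-- A's for-loop with early return: state (depth, in_str, esc), processed char by char.
def pvALoop (depth : Int) (in_str esc : Bool) : List Char → Bool
  | [] => true
  | c :: cs =>
    if in_str then
      if esc then pvALoop depth in_str false cs
      else if c = '\\' then pvALoop depth in_str true cs
      else if c = '"' then pvALoop depth false esc cs
      else pvALoop depth in_str esc cs
    else
      if c = '"' then pvALoop depth true esc cs
      else if c = '{' then pvALoop (depth + 1) in_str esc cs
      else if c = '}' then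
        if depth - 1 = 0 then false else pvALoop (depth - 1) in_str esc cs
      else pvALoop depth in_str esc cs

def is_likely_truncated_json (txt : String) : Bool :=
  let s := PySem.Str.strip (if txt = "" then "" else txt)
  if !(PySem.Str.startswith s "{") then false
  else pvALoop 0 false false s.toList

-- ===== PORT B =====
-- pass 1: keep only the structural braces outside string literals
def pvFilterBraces (in_str esc : Bool) : List Char → List Char
  | [] => []
  | c :: cs =>
    if in_str then
      if esc then pvFilterBraces in_str false cs
      else if c = '\\' then pvFilterBraces in_str true cs
      else if c = '"' then pvFilterBraces false esc cs
      else pvFilterBraces in_str esc cs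
    else
      if c = '"' then pvFilterBraces true esc cs
      else if c = '{' ∨ c = '}' then c :: pvFilterBraces in_str esc cs
      else pvFilterBraces in_str esc cs

-- pass 2: balance the filtered braces, early false at the first top-level close
def pvScanBraces (depth : Int) : List Char → Bool
  | [] => true
  | c :: cs =>
    if c = '{' then pvScanBraces (depth + 1) cs
    else if depth - 1 = 0 then false
    else pvScanBraces (depth - 1) cs

def is_likely_truncated_json_alt (txt : String) : Bool :=
  let s := PySem.Str.strip (if txt = "" then "" else txt)
  if !(PySem.Str.startswith s "{") then false
  else pvScanBraces 0 (pvFilterBraces false false s.toList)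

-- ===== PRECONDITION & SPEC =====
def Spec_is_likely_truncated_json (txt : String) (out : Bool) : Prop := out = is_likely_truncated_json_alt txt
instance (txt : String) (out : Bool) : Decidable (Spec_is_likely_truncated_json txt out) := by unfold Spec_is_likely_truncated_json; infer_instance

-- ===== CLAIM (what is proved, stated in full; the proofs are below) =====
def Claim_equal_is_likely_truncated_json : Prop := ∀ (txt : String), Dom_is_likely_truncated_json txt → Spec_is_likely_truncated_json txt (is_likely_truncated_json txt)

-- ===== LEMMAS AND PROOFS =====

-- the interleaved scan equals balancing the filtered braces, for any state
theorem pvALoop_eq_scan_filter (cs : List Char) :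
    ∀ (depth : Int) (in_str esc : Bool),
      pvALoop depth in_str esc cs = pvScanBraces depth (pvFilterBraces in_str esc cs) := by
  induction cs with
  | nil => intro depth in_str esc; simp [pvALoop, pvFilterBraces, pvScanBraces]
  | cons c cs ih =>
    intro depth in_str esc
    by_cases hs : in_str
    · by_cases he : esc <;> simp [pvALoop, pvFilterBraces, hs, he, ih] <;> split_ifs <;> rfl
    · by_cases hq : c = '"'
      · simp [pvALoop, pvFilterBraces, hs, hq, ih]
      · by_cases ho : c = '{'
        · simp [pvALoop, pvFilterBraces, pvScanBraces, hs, ho, ih]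
        · by_cases hc : c = '}'
          · simp [pvALoop, pvFilterBraces, pvScanBraces, hs, hc]
            rw [ih]
          · simp [pvALoop, pvFilterBraces, hs, hq, ho, hc, ih]

-- ===== VERDICT (by name: the statement is the Claim_ definition above) =====
theorem is_likely_truncated_json_spec : Claim_equal_is_likely_truncated_json := by
  intro txt _
  unfold Spec_is_likely_truncated_json is_likely_truncated_json is_likely_truncated_json_alt
  simp only [pvALoop_eq_scan_filter]
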